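-- pv_equiv track=rewrite | github.com/AmitDhavale77/Tuza_Technical_Challenge | data_processing.py | assign_mcc_category
-- ===== SOURCE A (Python) =====
-- def assign_mcc_category(mcc):
--     """
--     Assigns an MCC (Merchant Category Code) to a predefined category based on its range.
--
--     Parameters:
--     - mcc (int): The Merchant Category Code to be classified.
--
--     Returns:
--     - str: The category name that the MCC falls into, or 'Unknown' if no match is found.
--     """
--     mcc_categories = {
--         "Agricultural Services": (1, 1499),
--         "Contracted Services": (1500, 2999),
--         "Travel": (3000, 3999),
--         "Transportation Services": (4000, 4799),
--         "Utility Services": (4800, 4999),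
--         "Retail Outlet Services": (5000, 5599),
--         "Clothing Stores": (5600, 5699),
--         "Miscellaneous Stores": (5700, 7299),
--         "Business Services": (7300, 7999),
--         "Professional Services and Membership Organizations": (8000, 8999),
--     }
--
--     for category, (low, high) in mcc_categories.items():
--         if low <= mcc <= high:
--             return category
--     return "Unknown"
-- ===== SOURCE B (Python) =====
-- HIGHS = [1499, 2999, 3999, 4799, 4999, 5599, 5699, 7299, 7999, 8999]
-- LOWS = [1, 1500, 3000, 4000, 4800, 5000, 5600, 5700, 7300, 8000]
-- CATS = [
--     "Agricultural Services",
--     "Contracted Services",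
--     "Travel",
--     "Transportation Services",
--     "Utility Services",
--     "Retail Outlet Services",
--     "Clothing Stores",
--     "Miscellaneous Stores",
--     "Business Services",
--     "Professional Services and Membership Organizations",
-- ]
--
--
-- def assign_mcc_category(mcc):
--     """Binary search over the table of range upper bounds (bisect_left)."""
--     lo, hi = 0, len(HIGHS)
--     while lo < hi:
--         mid = (lo + hi) // 2
--         if HIGHS[mid] < mcc:
--             lo = mid + 1
--         else:
--             hi = mid
--     if lo < len(HIGHS) and LOWS[lo] <= mcc <= HIGHS[lo]:
--         return CATS[lo]
--     return "Unknown"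
-- ===== Notes on version B (the rewrite author's own statement) =====
-- stated objective: alternative
-- what changed: Replaced the linear scan over all ten (low,high) ranges with a binary search (hand-written bisect_left) over a sorted table of upper bounds, followed by a single bounds check of the located range.
import Mathlib
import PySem

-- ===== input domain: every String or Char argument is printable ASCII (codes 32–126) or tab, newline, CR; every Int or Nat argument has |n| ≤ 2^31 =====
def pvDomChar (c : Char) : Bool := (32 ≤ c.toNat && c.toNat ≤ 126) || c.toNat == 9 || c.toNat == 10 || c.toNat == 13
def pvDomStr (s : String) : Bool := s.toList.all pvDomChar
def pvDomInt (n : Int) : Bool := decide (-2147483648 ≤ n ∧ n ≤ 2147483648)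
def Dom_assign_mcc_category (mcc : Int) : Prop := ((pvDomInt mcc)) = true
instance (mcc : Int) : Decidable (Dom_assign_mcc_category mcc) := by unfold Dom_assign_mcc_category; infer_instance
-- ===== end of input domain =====

-- B replaces A's linear scan over the ten ranges by a binary search (bisect_left) on the
-- sorted upper-bound table plus one bounds check; alternative algorithm, same result.

-- ===== PORT A =====
-- the dict literal of A, in insertion order, as (category, (low, high)) items
def pvMccCategories : List (String × Int × Int) :=
  [("Agricultural Services", (1, 1499)),
   ("Contracted Services", (1500, 2999)),
   ("Travel", (3000, 3999)),
   ("Transportation Services", (4000, 4799)),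
   ("Utility Services", (4800, 4999)),
   ("Retail Outlet Services", (5000, 5599)),
   ("Clothing Stores", (5600, 5699)),
   ("Miscellaneous Stores", (5700, 7299)),
   ("Business Services", (7300, 7999)),
   ("Professional Services and Membership Organizations", (8000, 8999))]

-- the 'for category, (low, high) in …: if low <= mcc <= high: return category' loop
def pvScan (mcc : Int) : List (String × Int × Int) → String
  | [] => "Unknown"
  | (cat, low, high) :: rest =>
      if low ≤ mcc ∧ mcc ≤ high then cat else pvScan mcc rest

def assign_mcc_category (mcc : Int) : String := pvScan mcc pvMccCategories

-- ===== PORT B =====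
def pvHighs : List Int := [1499, 2999, 3999, 4799, 4999, 5599, 5699, 7299, 7999, 8999]
def pvLows : List Int := [1, 1500, 3000, 4000, 4800, 5000, 5600, 5700, 7300, 8000]
def pvCats : List String :=
  ["Agricultural Services", "Contracted Services", "Travel", "Transportation Services",
   "Utility Services", "Retail Outlet Services", "Clothing Stores", "Miscellaneous Stores",
   "Business Services", "Professional Services and Membership Organizations"]

-- the 'while lo < hi' binary-search loop of Source B (bisect_left on pvHighs)
def pvBisect (mcc : Int) (lo hi : Nat) : Nat :=
  if _h : lo < hi then
    let mid := (lo + hi) / 2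
    if pvHighs.getD mid 0 < mcc then pvBisect mcc (mid + 1) hi
    else pvBisect mcc lo mid
  else lo
termination_by hi - lo
decreasing_by all_goals omega

def assign_mcc_category_alt (mcc : Int) : String :=
  let lo := pvBisect mcc 0 pvHighs.length
  if lo < pvHighs.length ∧ pvLows.getD lo 0 ≤ mcc ∧ mcc ≤ pvHighs.getD lo 0 then
    pvCats.getD lo ""
  else "Unknown"

-- ===== PRECONDITION & SPEC =====
def Spec_assign_mcc_category (mcc : Int) (out : String) : Prop := out = assign_mcc_category_alt mcc
instance (mcc : Int) (out : String) : Decidable (Spec_assign_mcc_category mcc out) := by unfold Spec_assign_mcc_category; infer_instance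

-- ===== CLAIM (what is proved, stated in full; the proofs are below) =====
def Claim_equal_assign_mcc_category : Prop := ∀ (mcc : Int), Dom_assign_mcc_category mcc → Spec_assign_mcc_category mcc (assign_mcc_category mcc)

-- ===== LEMMAS AND PROOFS =====

set_option maxRecDepth 10000 in
lemma pvBisect_eval0 (mcc : Int) (hh : mcc ≤ 1499) : pvBisect mcc 0 10 = 0 := by
  simp [pvBisect, pvHighs]
  split_ifs <;> omega

set_option maxRecDepth 10000 in
lemma pvBisect_eval1 (mcc : Int) (hl : 1499 < mcc) (hh : mcc ≤ 2999) : pvBisect mcc 0 10 = 1 := by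
  simp [pvBisect, pvHighs]
  split_ifs <;> omega

set_option maxRecDepth 10000 in
lemma pvBisect_eval2 (mcc : Int) (hl : 2999 < mcc) (hh : mcc ≤ 3999) : pvBisect mcc 0 10 = 2 := by
  simp [pvBisect, pvHighs]
  split_ifs <;> omega

set_option maxRecDepth 10000 in
lemma pvBisect_eval3 (mcc : Int) (hl : 3999 < mcc) (hh : mcc ≤ 4799) : pvBisect mcc 0 10 = 3 := by
  simp [pvBisect, pvHighs]
  split_ifs <;> omega

set_option maxRecDepth 10000 in
lemma pvBisect_eval4 (mcc : Int) (hl : 4799 < mcc) (hh : mcc ≤ 4999) : pvBisect mcc 0 10 = 4 := by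
  simp [pvBisect, pvHighs]
  split_ifs <;> omega

set_option maxRecDepth 10000 in
lemma pvBisect_eval5 (mcc : Int) (hl : 4999 < mcc) (hh : mcc ≤ 5599) : pvBisect mcc 0 10 = 5 := by
  simp [pvBisect, pvHighs]
  split_ifs <;> omega

set_option maxRecDepth 10000 in
lemma pvBisect_eval6 (mcc : Int) (hl : 5599 < mcc) (hh : mcc ≤ 5699) : pvBisect mcc 0 10 = 6 := by
  simp [pvBisect, pvHighs]
  split_ifs <;> omega

set_option maxRecDepth 10000 in
lemma pvBisect_eval7 (mcc : Int) (hl : 5699 < mcc) (hh : mcc ≤ 7299) : pvBisect mcc 0 10 = 7 := by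
  simp [pvBisect, pvHighs]
  split_ifs <;> omega

set_option maxRecDepth 10000 in
lemma pvBisect_eval8 (mcc : Int) (hl : 7299 < mcc) (hh : mcc ≤ 7999) : pvBisect mcc 0 10 = 8 := by
  simp [pvBisect, pvHighs]
  split_ifs <;> omega

set_option maxRecDepth 10000 in
lemma pvBisect_eval9 (mcc : Int) (hl : 7999 < mcc) (hh : mcc ≤ 8999) : pvBisect mcc 0 10 = 9 := by
  simp [pvBisect, pvHighs]
  split_ifs <;> omega

set_option maxRecDepth 10000 in
lemma pvBisect_eval10 (mcc : Int) (hl : 8999 < mcc) : pvBisect mcc 0 10 = 10 := by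
  simp [pvBisect, pvHighs]
  split_ifs <;> omega

-- ===== VERDICT (by name: the statement is the Claim_ definition above) =====
set_option maxHeartbeats 8000000 in
theorem assign_mcc_category_spec : Claim_equal_assign_mcc_category := by
  intro mcc _
  unfold Spec_assign_mcc_category assign_mcc_category assign_mcc_category_alt
  have hlen : pvHighs.length = 10 := rfl
  rw [hlen]
  by_cases c0 : mcc ≤ 1499
  · rw [pvBisect_eval0 mcc (by omega)]
    simp only [pvScan, pvMccCategories, pvHighs, pvLows, pvCats, List.getD]
    norm_num
    split_ifs <;> first | rfl | omega
  by_cases c1 : mcc ≤ 2999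
  · rw [pvBisect_eval1 mcc (by omega) (by omega)]
    simp only [pvScan, pvMccCategories, pvHighs, pvLows, pvCats, List.getD]
    norm_num
    split_ifs <;> first | rfl | omega
  by_cases c2 : mcc ≤ 3999
  · rw [pvBisect_eval2 mcc (by omega) (by omega)]
    simp only [pvScan, pvMccCategories, pvHighs, pvLows, pvCats, List.getD]
    norm_num
    split_ifs <;> first | rfl | omega
  by_cases c3 : mcc ≤ 4799
  · rw [pvBisect_eval3 mcc (by omega) (by omega)]
    simp only [pvScan, pvMccCategories, pvHighs, pvLows, pvCats, List.getD]
    norm_num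
    split_ifs <;> first | rfl | omega
  by_cases c4 : mcc ≤ 4999
  · rw [pvBisect_eval4 mcc (by omega) (by omega)]
    simp only [pvScan, pvMccCategories, pvHighs, pvLows, pvCats, List.getD]
    norm_num
    split_ifs <;> first | rfl | omega
  by_cases c5 : mcc ≤ 5599
  · rw [pvBisect_eval5 mcc (by omega) (by omega)]
    simp only [pvScan, pvMccCategories, pvHighs, pvLows, pvCats, List.getD]
    norm_num
    split_ifs <;> first | rfl | omega
  by_cases c6 : mcc ≤ 5699
  · rw [pvBisect_eval6 mcc (by omega) (by omega)]
    simp only [pvScan, pvMccCategories, pvHighs, pvLows, pvCats, List.getD]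
    norm_num
    split_ifs <;> first | rfl | omega
  by_cases c7 : mcc ≤ 7299
  · rw [pvBisect_eval7 mcc (by omega) (by omega)]
    simp only [pvScan, pvMccCategories, pvHighs, pvLows, pvCats, List.getD]
    norm_num
    split_ifs <;> first | rfl | omega
  by_cases c8 : mcc ≤ 7999
  · rw [pvBisect_eval8 mcc (by omega) (by omega)]
    simp only [pvScan, pvMccCategories, pvHighs, pvLows, pvCats, List.getD]
    norm_num
    split_ifs <;> first | rfl | omega
  by_cases c9 : mcc ≤ 8999
  · rw [pvBisect_eval9 mcc (by omega) (by omega)]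
    simp only [pvScan, pvMccCategories, pvHighs, pvLows, pvCats, List.getD]
    norm_num
    split_ifs <;> first | rfl | omega
  rw [pvBisect_eval10 mcc (by omega)]
  simp only [pvScan, pvMccCategories, pvHighs, pvLows, pvCats, List.getD]
  norm_num
  split_ifs <;> first | rfl | omega
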